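-- pv_equiv track=rewrite | github.com/jspong/advent_of_code | 2015/03/solution.py | solution
-- ===== SOURCE A (Python) =====
-- def solution(s):
--     santa = 0, 0
--     robo = 0, 0
--     steps = {
--         '>': (1, 0),
--         '<': (-1, 0),
--         '^': (0, 1),
--         'v': (0, -1)
--     }
--     visited = set()
--     for i, c in enumerate(s):
--         if i % 2 == 0:
--             pos = santa
--         else:
--             pos = robo
--         visited.add(pos)
--         step = steps.get(c, (0,0))
--         pos = pos[0] + step[0], pos[1] + step[1]
--         if i % 2 == 0:
--             santa = pos
--         else:
--             robo = pos
--
--     visited.add(robo)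
--     visited.add(santa)
--     return len(visited)
-- ===== SOURCE B (Python) =====
-- def solution(s):
--     steps = {
--         '>': (1, 0),
--         '<': (-1, 0),
--         '^': (0, 1),
--         'v': (0, -1)
--     }
--
--     def walk(chars):
--         pos = (0, 0)
--         seen = [pos]
--         for c in chars:
--             dx, dy = steps.get(c, (0, 0))
--             pos = (pos[0] + dx, pos[1] + dy)
--             seen.append(pos)
--         return seen
--
--     return len(set(walk(s[::2])) | set(walk(s[1::2])))
-- ===== Notes on version B (the rewrite author's own statement) =====
-- stated objective: alternative
-- what changed: Replaces A's single interleaved pass with its i%2 alternation branch and two-mover state by two independent walks over the slices s[::2] (santa) and s[1::2] (robo), uniting the two position sets and returning the union's size.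
import Mathlib
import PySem

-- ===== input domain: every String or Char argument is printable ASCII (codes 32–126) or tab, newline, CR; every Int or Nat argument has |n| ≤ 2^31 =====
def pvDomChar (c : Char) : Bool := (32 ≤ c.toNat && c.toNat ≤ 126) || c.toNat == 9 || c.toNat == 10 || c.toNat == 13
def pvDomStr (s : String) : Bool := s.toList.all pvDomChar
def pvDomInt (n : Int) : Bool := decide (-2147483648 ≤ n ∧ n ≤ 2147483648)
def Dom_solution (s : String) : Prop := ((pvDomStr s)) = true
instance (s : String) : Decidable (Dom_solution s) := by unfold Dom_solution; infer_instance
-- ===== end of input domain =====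

-- B replaces A's single interleaved pass with i%2 alternation by two independent walks
-- over s[::2] and s[1::2] whose position sets are united (objective: alternative decomposition).

-- the direction table, shared verbatim by both Pythons
def pvSteps : PySem.Dict Char (Int × Int) :=
  ((((PySem.Dict.empty).insert '>' (1, 0)).insert '<' (-1, 0)).insert '^' (0, 1)).insert 'v' (0, -1)

-- ===== PORT A =====
def solution (s : String) : Int :=
  let st :=
    (PySem.List.enumerate s.toList).foldl
      (fun (acc : (Int × Int) × (Int × Int) × PySem.Set (Int × Int)) ic =>
        let pos := if ic.1 % 2 == 0 then acc.1 else acc.2.1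
        let visited := PySem.Set.add acc.2.2 pos
        let step := pvSteps.getD ic.2 (0, 0)
        let pos := (pos.1 + step.1, pos.2 + step.2)
        if ic.1 % 2 == 0 then (pos, acc.2.1, visited) else (acc.1, pos, visited))
      (((0, 0), (0, 0), PySem.Set.empty))
  PySem.Set.len (PySem.Set.add (PySem.Set.add st.2.2 st.2.1) st.1)

-- ===== PORT B =====
def pvWalk (chars : List Char) : List (Int × Int) :=
  (chars.foldl
    (fun (acc : (Int × Int) × List (Int × Int)) c =>
      let d := pvSteps.getD c (0, 0)
      let pos := (acc.1.1 + d.1, acc.1.2 + d.2)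
      (pos, acc.2 ++ [pos]))
    ((0, 0), [((0 : Int), (0 : Int))])).2

def solution_alt (s : String) : Int :=
  let w1 := (PySem.List.slice? s.toList none none 2).getD []
  let w2 := (PySem.List.slice? s.toList (some 1) none 2).getD []
  PySem.Set.len (PySem.Set.union (PySem.Set.ofList (pvWalk w1)) (PySem.Set.ofList (pvWalk w2)))

-- ===== PRECONDITION & SPEC =====
def Spec_solution (s : String) (out : Int) : Prop := out = solution_alt s
instance (s : String) (out : Int) : Decidable (Spec_solution s out) := by unfold Spec_solution; infer_instance

-- ===== CLAIM (what is proved, stated in full; the proofs are below) =====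
def Claim_equal_solution : Prop := ∀ (s : String), Dom_solution s → Spec_solution s (solution s)

-- ===== LEMMAS AND PROOFS =====

-- one Python step
def pvMv (p : Int × Int) (c : Char) : Int × Int :=
  ((p.1 + (pvSteps.getD c (0, 0)).1, p.2 + (pvSteps.getD c (0, 0)).2))

-- every other element starting at the head
def pvEvens {α : Type} : List α → List α
  | [] => []
  | [c] => [c]
  | c1 :: _ :: cs => c1 :: pvEvens cs

def pvOdds {α : Type} (cs : List α) : List α := pvEvens cs.tail

-- positions occupied before each step
def pvPres (p : Int × Int) : List Char → List (Int × Int)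
  | [] => []
  | c :: cs => p :: pvPres (pvMv p c) cs

def pvFin (p : Int × Int) (cs : List Char) : Int × Int := cs.foldl pvMv p

-- all positions (before each step plus the final one)
def pvAll (p : Int × Int) (cs : List Char) : List (Int × Int) := pvPres p cs ++ [pvFin p cs]

def pvInter {α : Type} : List α → List α → List α
  | [], ys => ys
  | x :: xs, ys => x :: pvInter ys xs
termination_by xs ys => xs.length + ys.length
decreasing_by simp; omega

theorem pvEvens_cons {α : Type} (c : α) (cs : List α) : pvEvens (c :: cs) = c :: pvEvens cs.tail := by
  cases cs <;> rfl

theorem pvAll_cons (p : Int × Int) (c : Char) (cs : List Char) :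
    pvAll p (c :: cs) = p :: pvAll (pvMv p c) cs := by
  simp [pvAll, pvPres, pvFin]

theorem mem_pvInter {α : Type} (xs ys : List α) (y : α) :
    y ∈ pvInter xs ys ↔ y ∈ xs ∨ y ∈ ys := by
  induction xs, ys using pvInter.induct with
  | case1 ys => simp [pvInter]
  | case2 x xs ys ih => simp [pvInter, ih]; tauto

theorem pvWalk_aux (cs : List Char) : ∀ (pos : Int × Int) (seen : List (Int × Int)),
    (cs.foldl
      (fun (acc : (Int × Int) × List (Int × Int)) c =>
        let d := pvSteps.getD c (0, 0)
        let pos := (acc.1.1 + d.1, acc.1.2 + d.2)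
        (pos, acc.2 ++ [pos]))
      ((pos, seen ++ [pos]))).2 = seen ++ pvAll pos cs := by
  induction cs with
  | nil => intro pos seen; simp [pvAll, pvPres, pvFin]
  | cons c cs ih =>
    intro pos seen
    have h := ih (pvMv pos c) (seen ++ [pos])
    simp only [List.foldl_cons]
    simp only [List.append_assoc] at h
    refine Eq.trans ?_ (by rw [pvAll_cons]; simp : seen ++ ([pos] ++ pvAll (pvMv pos c) cs) = seen ++ pvAll pos (c :: cs))
    simpa [pvMv, List.append_assoc] using h

theorem pvWalk_eq (cs : List Char) : pvWalk cs = pvAll (0, 0) cs := by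
  have h := pvWalk_aux cs (0, 0) []
  simpa [pvWalk] using h

theorem core_evens {α : Type} : ∀ (xs : List α) (n : Nat), (xs.length + 1) / 2 ≤ n →
    List.filterMap (fun k : Nat => xs[2 * k]?) (List.range n) = pvEvens xs := by
  intro xs
  induction xs using pvEvens.induct with
  | case1 => intro n h; simp [pvEvens]
  | case2 c =>
    intro n h
    obtain ⟨m, rfl⟩ : ∃ m, n = m + 1 := ⟨n - 1, by simp at h; omega⟩
    rw [List.range_succ_eq_map, List.filterMap_cons, List.filterMap_map]
    simp [pvEvens, Nat.succ_eq_add_one]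
  | case3 c1 c2 cs ih =>
    intro n h
    obtain ⟨m, rfl⟩ : ∃ m, n = m + 1 := ⟨n - 1, by simp at h; omega⟩
    rw [List.range_succ_eq_map, List.filterMap_cons, List.filterMap_map]
    have h2 : (cs.length + 1) / 2 ≤ m := by simp at h; omega
    have hih := ih m h2
    simp only [Function.comp_def, Nat.succ_eq_add_one]
    have hsh : ∀ k : Nat, (c1 :: c2 :: cs)[2 * (k + 1)]? = cs[2 * k]? := by
      intro k
      have : 2 * (k + 1) = 2 * k + 1 + 1 := by ring
      rw [this]; simp
    rw [List.filterMap_congr (fun k _ => hsh k), hih]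
    simp [pvEvens]

theorem core_odds {α : Type} (xs : List α) (n : Nat) (h : xs.length / 2 ≤ n) :
    List.filterMap (fun k : Nat => xs[2 * k + 1]?) (List.range n) = pvOdds xs := by
  have hs : ∀ k : Nat, xs[2 * k + 1]? = xs.tail[2 * k]? := by
    intro k; cases xs <;> simp
  rw [List.filterMap_congr (fun k _ => hs k)]
  exact core_evens xs.tail n (by cases xs <;> simp_all)

theorem slice_evens {α : Type} (xs : List α) :
    PySem.List.slice? xs none none 2 = some (pvEvens xs) := by
  simp only [PySem.List.slice?, PySem.List.sliceIndices]
  norm_num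
  have hf : ∀ k : Nat, (fun x : Nat => xs[(2 * (x:Int)).toNat]?) k = (fun x : Nat => xs[2 * x]?) k := by
    intro k
    show xs[(2 * (k:Int)).toNat]? = xs[2 * k]?
    have h2 : (2 * (k:Int)).toNat = 2 * k := by omega
    rw [h2]
  split_ifs with hlen
  · rw [List.filterMap_congr (fun k _ => hf k)]
    have hC : ((((xs.length : Int)) + 2 - 1) / 2).toNat = (xs.length + 1) / 2 := by omega
    rw [hC]
    exact core_evens xs _ (le_refl _)
  · have : xs = [] := by cases xs <;> simp_all
    subst this; simp [pvEvens]

theorem slice_odds {α : Type} (xs : List α) :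
    PySem.List.slice? xs (some 1) none 2 = some (pvOdds xs) := by
  simp only [PySem.List.slice?, PySem.List.sliceIndices]
  norm_num
  rcases xs with _ | ⟨c, cs⟩
  · simp [pvOdds, pvEvens]
  · have hmin : min (1:Int) ((c :: cs).length : Int) = 1 := by simp
    rw [hmin]
    have hf : ∀ k : Nat, (fun x : Nat => (c :: cs)[((1:Int) + 2 * (x:Int)).toNat]?) k
        = (fun x : Nat => (c :: cs)[2 * x + 1]?) k := by
      intro k
      show (c :: cs)[((1:Int) + 2 * (k:Int)).toNat]? = (c :: cs)[2 * k + 1]?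
      have h2 : ((1:Int) + 2 * (k:Int)).toNat = 2 * k + 1 := by omega
      rw [h2]
    split_ifs with hlen
    · rw [List.filterMap_congr (fun k _ => hf k)]
      have hC : ((((c :: cs).length : Int) - 1 + 2 - 1) / 2).toNat = (c :: cs).length / 2 := by
        omega
      rw [hC]
      exact core_odds _ _ (le_refl _)
    · have : cs = [] := by
        simp only [List.length_cons] at hlen
        exact List.eq_nil_of_length_eq_zero (by omega)
      subst this; simp [pvOdds, pvEvens]

theorem foldA_inv (cs : List Char) : ∀ (i : Int), i % 2 = 0 →
    ∀ (santa robo : Int × Int) (v : PySem.Set (Int × Int)),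
    (PySem.List.enumerate cs i).foldl
      (fun (acc : (Int × Int) × (Int × Int) × PySem.Set (Int × Int)) ic =>
        let pos := if ic.1 % 2 == 0 then acc.1 else acc.2.1
        let visited := PySem.Set.add acc.2.2 pos
        let step := pvSteps.getD ic.2 (0, 0)
        let pos := (pos.1 + step.1, pos.2 + step.2)
        if ic.1 % 2 == 0 then (pos, acc.2.1, visited) else (acc.1, pos, visited))
      ((santa, robo, v))
    = (pvFin santa (pvEvens cs), pvFin robo (pvOdds cs),
        PySem.Set.update v (pvInter (pvPres santa (pvEvens cs)) (pvPres robo (pvOdds cs)))) := by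
  induction cs using pvEvens.induct with
  | case1 =>
    intro i hi santa robo v
    simp [pvEvens, pvOdds, pvFin, pvPres, pvInter, PySem.List.enumerate]
  | case2 c =>
    intro i hi santa robo v
    have hdvd : (2:Int) ∣ i := by omega
    simp [PySem.List.enumerate_cons, PySem.List.enumerate_nil, hdvd,
      pvEvens, pvOdds, pvFin, pvPres, pvInter, pvMv, PySem.Set.update_cons]
  | case3 c1 c2 cs ih =>
    intro i hi santa robo v
    have h1 : (i % 2 == 0) = true := by simp [hi]
    have h2 : ((i + 1) % 2 == 0) = false := by
      have : (i + 1) % 2 = 1 := by omega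
      simp [this]
    rw [PySem.List.enumerate_cons, PySem.List.enumerate_cons]
    simp only [List.foldl_cons, h1, h2, Bool.false_eq_true, ite_true, ite_false]
    have hrec := ih (i + 1 + 1) (by omega) (pvMv santa c1) (pvMv robo c2)
      (PySem.Set.add (PySem.Set.add v santa) robo)
    simp only [pvMv] at hrec
    rw [hrec]
    show _ = (pvFin santa (c1 :: pvEvens cs), pvFin robo (pvEvens (c2 :: cs)),
      PySem.Set.update v (pvInter (pvPres santa (c1 :: pvEvens cs)) (pvPres robo (pvEvens (c2 :: cs)))))
    rw [pvEvens_cons c2 cs]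
    simp only [pvFin, List.foldl_cons, pvPres, pvInter, PySem.Set.update_cons, pvMv, pvOdds]

-- ===== VERDICT (by name: the statement is the Claim_ definition above) =====
theorem solution_spec : Claim_equal_solution := by
  unfold Claim_equal_solution
  intro s _
  unfold Spec_solution solution solution_alt
  rw [slice_evens, slice_odds]
  simp only [Option.getD_some, pvWalk_eq]
  rw [foldA_inv s.toList 0 (by decide)]
  have n1 : (PySem.Set.add (PySem.Set.add
      (PySem.Set.update PySem.Set.empty (pvInter (pvPres (0,0) (pvEvens s.toList)) (pvPres (0,0) (pvOdds s.toList))))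
      (pvFin (0,0) (pvOdds s.toList))) (pvFin (0,0) (pvEvens s.toList))).Nodup := by
    apply PySem.Set.nodup_add
    apply PySem.Set.nodup_add
    show (PySem.Set.update [] _).Nodup
    rw [PySem.Set.update_nil_left]
    exact PySem.Set.nodup_ofList _
  have n2 : (PySem.Set.union (PySem.Set.ofList (pvAll (0,0) (pvEvens s.toList)))
      (PySem.Set.ofList (pvAll (0,0) (pvOdds s.toList)))).Nodup :=
    PySem.Set.nodup_union _ _ (PySem.Set.nodup_ofList _)
  have hmem : ∀ y, y ∈ (PySem.Set.add (PySem.Set.add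
      (PySem.Set.update PySem.Set.empty (pvInter (pvPres (0,0) (pvEvens s.toList)) (pvPres (0,0) (pvOdds s.toList))))
      (pvFin (0,0) (pvOdds s.toList))) (pvFin (0,0) (pvEvens s.toList)))
      ↔ y ∈ (PySem.Set.union (PySem.Set.ofList (pvAll (0,0) (pvEvens s.toList)))
      (PySem.Set.ofList (pvAll (0,0) (pvOdds s.toList)))) := by
    intro y
    rw [PySem.Set.mem_add, PySem.Set.mem_add, PySem.Set.mem_update, PySem.Set.mem_union,
      PySem.Set.mem_ofList, PySem.Set.mem_ofList, mem_pvInter]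
    simp [PySem.Set.empty, pvAll]
    tauto
  have hperm := (List.perm_ext_iff_of_nodup n1 n2).2 hmem
  simp only [PySem.Set.len, hperm.length_eq]
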